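-- pv_equiv track=rewrite | github.com/dhenriquex/OLIP | ex30.py | subVetores
-- ===== SOURCE A (Python) =====
-- def subVetores(n, vetor):
--     from collections import Counter
--     #importa a biblioteca Counter para contar ocorrências de prefixos
--     # ele funciona como um dicionário que mapeia cada prefixo a sua contagem de ocorrências
--     prefixo = 0
--     contador = Counter()
--     contador[0] = 1
--     #inicializa o prefixo com 0 e o contador com 1 para o prefixo 0
--     # para vetores vazios, o prefixo 0 é considerado como um subvetor válido e par
--     total = 0
--     for i in vetor:
--         prefixo ^= i
--         total += contador[1 - prefixo]
--         contador[prefixo] += 1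
--         # contador = {0:qtd0, 1:qtd1}
--     return total
-- ===== SOURCE B (Python) =====
-- def subVetores(n, vetor):
--     # Same count via explicit prefix list + quadratic scan of earlier prefixes
--     prefixes = [0]
--     acc = 0
--     for x in vetor:
--         acc ^= x
--         prefixes.append(acc)
--     total = 0
--     for j in range(1, len(prefixes)):
--         total += prefixes[:j].count(1 - prefixes[j])
--     return total
-- ===== Notes on version B (the rewrite author's own statement) =====
-- stated objective: alternative
-- what changed: Replaced the incremental Counter hash with an explicit prefix-XOR list built first and a quadratic scan counting, for each position j, the strictly earlier prefixes equal to 1 - prefixes[j].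
import Mathlib
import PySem

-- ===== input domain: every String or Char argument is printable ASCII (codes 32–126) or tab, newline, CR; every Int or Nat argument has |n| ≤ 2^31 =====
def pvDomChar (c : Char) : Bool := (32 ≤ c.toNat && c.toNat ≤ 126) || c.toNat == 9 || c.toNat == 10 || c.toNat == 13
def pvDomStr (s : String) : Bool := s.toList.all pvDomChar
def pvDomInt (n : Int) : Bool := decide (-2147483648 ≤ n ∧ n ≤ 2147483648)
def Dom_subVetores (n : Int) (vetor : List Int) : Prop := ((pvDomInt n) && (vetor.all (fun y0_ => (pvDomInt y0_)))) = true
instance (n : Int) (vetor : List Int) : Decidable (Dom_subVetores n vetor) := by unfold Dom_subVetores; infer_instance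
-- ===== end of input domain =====

-- B replaces A's incremental Counter with an explicit prefix-XOR list and a quadratic
-- scan of strictly earlier prefixes (alternative decomposition, not faster).


-- ===== PORT A =====
-- Counter lookup 'contador[1 - prefixo]' returns 0 for a missing key (and does not
-- insert it); 'contador[prefixo] += 1' is getD 0 + 1 then insert.
def subVetores (n : Int) (vetor : List Int) : Int :=
  let contador : PySem.Dict Int Int := PySem.Dict.empty.insert 0 1
  let s := vetor.foldl
    (fun (s : Int × PySem.Dict Int Int × Int) i =>
      let prefixo := PySem.Int.bxor s.1 i
      let total := s.2.2 + s.2.1.getD (1 - prefixo) 0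
      let contador := s.2.1.insert prefixo (s.2.1.getD prefixo 0 + 1)
      (prefixo, contador, total))
    (0, contador, 0)
  s.2.2

-- ===== PORT B =====
def subVetores_alt (n : Int) (vetor : List Int) : Int :=
  let p := vetor.foldl
    (fun (s : List Int × Int) x =>
      let acc := PySem.Int.bxor s.2 x
      (s.1 ++ [acc], acc))
    ([0], 0)
  let prefixes := p.1
  (PySem.List.pyRange 1 (prefixes.length : Int) 1).foldl
    (fun total j =>
      total + PySem.List.count (PySem.List.slice prefixes none (some j))
                (1 - PySem.List.pyGetD prefixes j 0))
    0

-- ===== PRECONDITION & SPEC =====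
def Spec_subVetores (n : Int) (vetor : List Int) (out : Int) : Prop := out = subVetores_alt n vetor
instance (n : Int) (vetor : List Int) (out : Int) : Decidable (Spec_subVetores n vetor out) := by unfold Spec_subVetores; infer_instance

-- ===== CLAIM (what is proved, stated in full; the proofs are below) =====
def Claim_equal_subVetores : Prop := ∀ (n : Int) (vetor : List Int), Dom_subVetores n vetor → Spec_subVetores n vetor (subVetores n vetor)

-- ===== LEMMAS AND PROOFS =====

-- the XOR-prefix values after the initial one
def pvTailPref (p : Int) : List Int → List Int
  | [] => []
  | x :: xs => PySem.Int.bxor p x :: pvTailPref (PySem.Int.bxor p x) xs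

-- common spec: for each remaining prefix q, count earlier prefixes equal to 1 - q
def pvPairs (seen : List Int) : List Int → Int
  | [] => 0
  | q :: rest => (seen.count (1 - q) : Int) + pvPairs (seen ++ [q]) rest

lemma a_fold (l : List Int) :
    ∀ (p t : Int) (d : PySem.Dict Int Int) (seen : List Int),
      (∀ v : Int, d.getD v 0 = (seen.count v : Int)) →
      (l.foldl
        (fun (s : Int × PySem.Dict Int Int × Int) i =>
          let prefixo := PySem.Int.bxor s.1 i
          let total := s.2.2 + s.2.1.getD (1 - prefixo) 0
          let contador := s.2.1.insert prefixo (s.2.1.getD prefixo 0 + 1)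
          (prefixo, contador, total))
        (p, d, t)).2.2 = t + pvPairs seen (pvTailPref p l) := by
  induction l with
  | nil => intro p t d seen _; simp [pvTailPref, pvPairs]
  | cons x xs ih =>
    intro p t d seen hinv
    simp only [List.foldl_cons, pvTailPref, pvPairs]
    rw [ih (PySem.Int.bxor p x) (t + d.getD (1 - PySem.Int.bxor p x) 0)
        (d.insert (PySem.Int.bxor p x) (d.getD (PySem.Int.bxor p x) 0 + 1))
        (seen ++ [PySem.Int.bxor p x]) ?_]
    · rw [hinv]; ring
    · intro v
      rw [PySem.Dict.getD_insert, hinv, hinv]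
      by_cases hv : v = PySem.Int.bxor p x
      · simp [hv, List.count_append]
      · simp [hv, List.count_append, Ne.symm hv]

lemma b_build (l : List Int) :
    ∀ (s : List Int) (acc : Int),
      (l.foldl
        (fun (s : List Int × Int) x =>
          let a := PySem.Int.bxor s.2 x
          (s.1 ++ [a], a))
        (s, acc)).1 = s ++ pvTailPref acc l := by
  induction l with
  | nil => intro s acc; simp [pvTailPref]
  | cons x xs ih =>
    intro s acc
    simp only [List.foldl_cons, pvTailPref]
    rw [ih]
    simp

lemma b_loop (P : List Int) (m : Nat) :
    ∀ (k : Nat) (t : Int), k + m = P.length →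
      (PySem.List.pyRange (k : Int) (P.length : Int) 1).foldl
        (fun total j =>
          total + (PySem.List.count (PySem.List.slice P none (some j))
                    (1 - PySem.List.pyGetD P j 0) : Int))
        t = t + pvPairs (P.take k) (P.drop k) := by
  induction m with
  | zero =>
    intro k t hk
    rw [PySem.List.pyRange_one_eq_nil (by omega)]
    simp [List.drop_eq_nil_of_le (by omega : P.length ≤ k), pvPairs]
  | succ m ih =>
    intro k t hk
    have hklt : k < P.length := by omega
    rw [PySem.List.pyRange_one_cons (by exact_mod_cast hklt)]
    simp only [List.foldl_cons]
    have hcast : ((k : Int) + 1) = ((k + 1 : Nat) : Int) := by push_cast; ring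
    rw [hcast, ih (k + 1) _ (by omega)]
    have hdrop : P.drop k = P[k] :: P.drop (k + 1) := List.drop_eq_getElem_cons hklt
    have htake : P.take (k + 1) = P.take k ++ [P[k]] := by
      rw [List.take_add_one]; simp [List.getElem?_eq_getElem hklt]
    rw [hdrop, htake]
    simp only [pvPairs]
    rw [PySem.List.slice_to_natCast, PySem.List.pyGetD_natCast,
        List.getD_eq_getElem?_getD, List.getElem?_eq_getElem hklt,
        PySem.List.count_eq]
    simp; ring

-- ===== VERDICT (by name: the statement is the Claim_ definition above) =====
theorem subVetores_spec : Claim_equal_subVetores := by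
  intro n vetor _
  unfold Spec_subVetores subVetores subVetores_alt
  simp only
  rw [a_fold vetor 0 0 _ [0] (by
    intro v
    rw [PySem.Dict.getD_insert]
    by_cases hv : v = 0
    · simp [hv]
    · simp [hv, PySem.Dict.getD_empty, Ne.symm hv])]
  rw [b_build vetor [0] 0]
  have hb := b_loop ([0] ++ pvTailPref 0 vetor) (pvTailPref 0 vetor).length 1 0 (by simp [Nat.add_comm])
  simp only [Nat.cast_one] at hb
  rw [hb]
  simp
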